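-- pv_equiv track=rewrite | github.com/ryuikaneko/cluster_mean_field | square__transverse_field_ising/ed_j1j2j3.py | make_num_mf1
-- ===== SOURCE A (Python) =====
-- def make_num_mf1(Lx,Ly):
--     list_num_mf1 = []
--     dist = 1
--     for y in range(Ly):
--         for x in range(Lx):
--             cnt = 0
--             if x+dist >= Lx:
--                 cnt += 1
--             if x-dist <= -1:
--                 cnt += 1
--             if y+dist >= Ly:
--                 cnt += 1
--             if y-dist <= -1:
--                 cnt += 1
--             list_num_mf1.append(cnt)
--     return list_num_mf1
-- ===== SOURCE B (Python) =====
-- def make_num_mf1(Lx, Ly):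
--     if Lx <= 0 or Ly <= 0:
--         return []
--     dist = 1
--     bx = [(1 if x + dist >= Lx else 0) + (1 if x - dist <= -1 else 0) for x in range(Lx)]
--     by = [(1 if y + dist >= Ly else 0) + (1 if y - dist <= -1 else 0) for y in range(Ly)]
--     return [vx + vy for vy in by for vx in bx]
-- ===== Notes on version B (the rewrite author's own statement) =====
-- stated objective: alternative
-- what changed: replaces the per-cell four-branch counting loop by two precomputed 1-D axis tables bx and by combined additively in a row-major comprehension
import Mathlib
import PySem

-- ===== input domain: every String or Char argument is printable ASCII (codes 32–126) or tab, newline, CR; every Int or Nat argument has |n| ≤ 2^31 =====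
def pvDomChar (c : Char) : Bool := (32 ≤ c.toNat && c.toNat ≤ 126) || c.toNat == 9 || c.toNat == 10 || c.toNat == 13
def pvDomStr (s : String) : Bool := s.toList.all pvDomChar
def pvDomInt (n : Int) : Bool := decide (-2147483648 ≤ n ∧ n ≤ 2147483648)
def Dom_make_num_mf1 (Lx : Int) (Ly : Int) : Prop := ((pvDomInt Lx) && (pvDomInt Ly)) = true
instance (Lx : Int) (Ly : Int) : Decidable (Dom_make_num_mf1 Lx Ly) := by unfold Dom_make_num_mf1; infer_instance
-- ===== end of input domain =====

-- B replaces A's per-cell four-branch counting by two precomputed 1-D axis tables combined additively (objective: alternative decomposition, same cost).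

-- ===== PORT A =====
def make_num_mf1 (Lx : Int) (Ly : Int) : List Int :=
  let dist : Int := 1
  (PySem.List.pyRange 0 Ly 1).foldl (fun acc y =>
    (PySem.List.pyRange 0 Lx 1).foldl (fun acc2 x =>
      let cnt : Int := 0
      let cnt := if x + dist ≥ Lx then cnt + 1 else cnt
      let cnt := if x - dist ≤ -1 then cnt + 1 else cnt
      let cnt := if y + dist ≥ Ly then cnt + 1 else cnt
      let cnt := if y - dist ≤ -1 then cnt + 1 else cnt
      acc2 ++ [cnt]) acc) []

-- ===== PORT B =====
def make_num_mf1_alt (Lx : Int) (Ly : Int) : List Int :=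
  if Lx ≤ 0 ∨ Ly ≤ 0 then [] else
  let dist : Int := 1
  let bx := (PySem.List.pyRange 0 Lx 1).map (fun x =>
    (if x + dist ≥ Lx then (1 : Int) else 0) + (if x - dist ≤ -1 then (1 : Int) else 0))
  let by' := (PySem.List.pyRange 0 Ly 1).map (fun y =>
    (if y + dist ≥ Ly then (1 : Int) else 0) + (if y - dist ≤ -1 then (1 : Int) else 0))
  by'.flatMap (fun vy => bx.map (fun vx => vx + vy))

-- ===== PRECONDITION & SPEC =====
def Spec_make_num_mf1 (Lx : Int) (Ly : Int) (out : List Int) : Prop := out = make_num_mf1_alt Lx Ly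
instance (Lx : Int) (Ly : Int) (out : List Int) : Decidable (Spec_make_num_mf1 Lx Ly out) := by unfold Spec_make_num_mf1; infer_instance

-- ===== CLAIM (what is proved, stated in full; the proofs are below) =====
def Claim_equal_make_num_mf1 : Prop := ∀ (Lx : Int) (Ly : Int), Dom_make_num_mf1 Lx Ly → Spec_make_num_mf1 Lx Ly (make_num_mf1 Lx Ly)

-- ===== LEMMAS AND PROOFS =====

-- ===== VERDICT (by name: the statement is the Claim_ definition above) =====
theorem make_num_mf1_spec : Claim_equal_make_num_mf1 := by
  intro Lx Ly _
  unfold Spec_make_num_mf1 make_num_mf1 make_num_mf1_alt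
  simp only [PySem.List.foldl_append_singleton_eq_map, PySem.List.foldl_append_eq_flatMap,
    List.nil_append, List.flatMap_map, List.map_map]
  by_cases h : Lx ≤ 0 ∨ Ly ≤ 0
  · rw [if_pos h]
    rcases h with h | h
    · simp only [PySem.List.pyRange_one]
      simp
      exact fun a ha => by omega
    · simp only [PySem.List.pyRange_one]
      simp
      exact fun a ha => by omega
  · rw [if_neg h]
    congr 1
    funext y
    congr 1
    funext x
    simp only [Function.comp_apply]
    split_ifs <;> omega
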